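-- pv_equiv track=rewrite | github.com/lhalla/advent-of-code-2019 | src/main/aoc/modules/password.py | viable_passwords
-- ===== SOURCE A (Python) =====
-- def has_double(password: str) -> bool:
--     for i in range(len(password) - 1):
--         if password[i] == password[i + 1]:
--             return True
--
--     return False
--
-- def viable_passwords(limits: [int]) -> [int]:
--     pw_min: str = "{0:06d}".format(min(limits))
--     # len_min: int = len(pw_min)
--
--     pw_max: str = "{0:06d}".format(max(limits))
--     len_max: int = len(pw_max)
--
--     digits: [str] = [str(i) for i in range(10)]
--
--     viables: [str] = [s for s in digits if s >= pw_min[0] and s <= pw_max[0]]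
--
--     length: int = 1
--     while length < len_max:
--         new_viables: [str] = []
--
--         while viables:
--             root: str = viables.pop(0)
--
--             new_viables.extend([root + s for s in digits if (root + s) >= pw_min[:length+1]
--                                 and (root + s) <= pw_max[:length+1] and s >= root[-1]])
--
--         viables = new_viables
--         length += 1
--
--     viables = [pw for pw in viables if has_double(pw)]
--
--     return [int(pw) for pw in viables]
-- ===== SOURCE B (Python) =====
-- from itertools import combinations_with_replacement
--
-- def viable_passwords(limits: [int]) -> [int]:
--     pw_min = "{0:06d}".format(min(limits))
--     pw_max = "{0:06d}".format(max(limits))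
--     width = len(pw_max)
--     result = []
--     for combo in combinations_with_replacement("0123456789", width):
--         s = "".join(combo)
--         if pw_min <= s <= pw_max and any(a == b for a, b in zip(s, s[1:])):
--             result.append(int(s))
--     return result
-- ===== Notes on version B (the rewrite author's own statement) =====
-- stated objective: alternative
-- what changed: A grows candidate strings level by level with prefix-bound pruning on a pop(0) worklist and re-slices both bounds for every candidate; B enumerates the non-decreasing digit strings of the target width directly (combinations_with_replacement) and keeps those within [pw_min, pw_max] with an adjacent double, in one pass.
import Mathlib
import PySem

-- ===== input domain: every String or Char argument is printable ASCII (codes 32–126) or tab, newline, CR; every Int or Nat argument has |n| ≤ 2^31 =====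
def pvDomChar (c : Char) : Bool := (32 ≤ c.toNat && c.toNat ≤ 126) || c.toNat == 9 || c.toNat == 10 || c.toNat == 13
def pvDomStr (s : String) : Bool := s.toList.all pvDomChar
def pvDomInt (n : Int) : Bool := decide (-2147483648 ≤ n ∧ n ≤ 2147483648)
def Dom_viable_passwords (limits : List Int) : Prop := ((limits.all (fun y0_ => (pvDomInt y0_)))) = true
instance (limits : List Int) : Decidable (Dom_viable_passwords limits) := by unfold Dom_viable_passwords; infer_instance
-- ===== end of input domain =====

-- B replaces A's level-by-level prefix-pruned search (with its pop(0) worklist) by a direct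
-- enumeration of non-decreasing digit strings (combinations_with_replacement) filtered once.


-- ===== PORT A =====
-- "{0:06d}".format(n) = str(n).zfill(6) exactly (sign kept in front)
def pvFmt06 (n : Int) : List Char := PySem.Chars.zfill (PySem.Int.toChars n) 6

-- has_double: early-return for loop over range(len(password)-1) = any; indices i, i+1 are in
-- range wherever they are read, so the pyGetD default ' ' is unreachable
def pvHasDouble (password : List Char) : Bool :=
  (PySem.List.pyRange 0 (PySem.Chars.len password - 1) 1).any
    (fun i => PySem.List.pyGetD password i ' ' == PySem.List.pyGetD password (i + 1) ' ')

-- digits = [str(i) for i in range(10)]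
def pvDigits : List (List Char) := (PySem.List.pyRange 0 10 1).map (fun i => PySem.Int.toChars i)

-- Python's x <= y on strings, written through PySem's pinned `<` (strLt): x <= y is not (y < x)
def pvLeB (x y : List Char) : Bool := !PySem.Chars.strLt y x

-- the body of the outer while loop: pop(0)-until-empty + extend = flatMap in order
def pvStep (pw_min pw_max : List Char) (viables : List (List Char)) (length : Int) :
    List (List Char) :=
  viables.flatMap (fun root =>
    ((pvDigits.filter (fun s =>
        pvLeB (PySem.List.slice pw_min none (some (length + 1))) (root ++ s) &&
        pvLeB (root ++ s) (PySem.List.slice pw_max none (some (length + 1))) &&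
        -- root[-1]: root is non-empty here (it has length ≥ 1), so the default is unreachable
        pvLeB ([PySem.List.pyGetD root (-1) ' ']) s)).map
      (fun s => root ++ s)))

-- initial viables; pw_min/pw_max are zero-filled to width ≥ 6, never empty, so the
-- pyGetD default ' ' for pw_min[0] / pw_max[0] is unreachable
def pvLvl1 (pw_min pw_max : List Char) : List (List Char) :=
  pvDigits.filter (fun s =>
    pvLeB ([PySem.List.pyGetD pw_min 0 ' ']) s &&
    pvLeB s ([PySem.List.pyGetD pw_max 0 ' ']))

-- min(limits)/max(limits): PySem.List.minD/maxD; the default 0 is unreachable under Pre_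
-- (limits ≠ []).  int(pw): pw is a non-empty digit string, so ofChars? is always some.
def viable_passwords (limits : List Int) : List Int :=
  let pw_min := pvFmt06 (PySem.List.minD limits (fun x => x) 0)
  let pw_max := pvFmt06 (PySem.List.maxD limits (fun x => x) 0)
  let len_max : Int := PySem.Chars.len pw_max
  let viables := pvLvl1 pw_min pw_max
  let viables := (PySem.List.pyRange 1 len_max 1).foldl (pvStep pw_min pw_max) viables
  (viables.filter pvHasDouble).map (fun pw => (PySem.Int.ofChars? pw).getD 0)

-- ===== PORT B =====
-- hand port of itertools.combinations_with_replacement over a pool of (distinct, sorted)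
-- characters, yielding exactly CPython's index-lexicographic order: combos starting with
-- pool[0] first (recursing with the same pool), then those drawn from the rest of the pool
def pvCwr (n : Nat) (pool : List Char) : List (List Char) :=
  match n, pool with
  | 0, _ => [[]]
  | _ + 1, [] => []
  | n + 1, c :: rest => ((pvCwr n (c :: rest)).map (fun t => c :: t)) ++ pvCwr (n + 1) rest
  termination_by (n, pool.length)

-- any(a == b for a, b in zip(s, s[1:]))
def pvHasAdj (s : List Char) : Bool :=
  (s.zip (PySem.List.slice s (some 1) none)).any (fun p => p.1 == p.2)

-- the for loop over combinations_with_replacement with a conditional append; "".join(combo)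
-- is the identity here since the pool already holds single characters
def viable_passwords_alt (limits : List Int) : List Int :=
  let pw_min := pvFmt06 (PySem.List.minD limits (fun x => x) 0)
  let pw_max := pvFmt06 (PySem.List.maxD limits (fun x => x) 0)
  let width := pw_max.length
  (pvCwr width ("0123456789".toList)).foldl
    (fun result combo =>
      if pvLeB pw_min combo && pvLeB combo pw_max && pvHasAdj combo then
        result ++ [(PySem.Int.ofChars? combo).getD 0]
      else result)
    []

-- ===== PRECONDITION & SPEC =====
-- min()/max() of an empty list raise ValueError: Pre_ excludes only limits = []
def Pre_viable_passwords (limits : List Int) : Prop := limits ≠ []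
instance (limits : List Int) : Decidable (Pre_viable_passwords limits) := by
  unfold Pre_viable_passwords; infer_instance

def pvWitness_viable_passwords : List Int := [111110, 111199]

def Spec_viable_passwords (limits : List Int) (out : List Int) : Prop :=
  out = viable_passwords_alt limits
instance (limits : List Int) (out : List Int) : Decidable (Spec_viable_passwords limits out) := by
  unfold Spec_viable_passwords; infer_instance

-- ===== CLAIM (what is proved, stated in full; the proofs are below) =====
def Claim_equal_viable_passwords : Prop :=
  ∀ (limits : List Int), Dom_viable_passwords limits → Pre_viable_passwords limits →
    Spec_viable_passwords limits (viable_passwords limits)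

-- ===== LEMMAS AND PROOFS =====

-- the ≤ these ports use, as a Prop: a ≤ b is ¬ b < a (lists compare lexicographically)
def pvLe (a b : List Char) : Prop := ¬ b < a

lemma pvLeB_iff {x y : List Char} : pvLeB x y = true ↔ pvLe x y := by
  simp [pvLeB, PySem.Chars.strLt, pvLe]

lemma pvLe_cons_iff {a b : Char} {l m : List Char} :
    pvLe (a :: l) (b :: m) ↔ a < b ∨ (a = b ∧ pvLe l m) := by
  unfold pvLe
  rw [List.cons_lt_cons_iff]
  rcases lt_trichotomy a b with h | h | h
  · simp [h, asymm h, h.ne']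
  · simp [h]
  · simp [h, asymm h, h.ne, h.ne']

lemma pvLe_nil (l : List Char) : pvLe [] l := by
  unfold pvLe
  intro h; cases h

lemma pvLe_nil_iff {a : Char} {l : List Char} : ¬ pvLe (a :: l) [] := by
  unfold pvLe
  simp [List.nil_lt_cons]

lemma pvLe_refl (l : List Char) : pvLe l l := by
  unfold pvLe
  induction l with
  | nil => intro h; cases h
  | cons a t ih =>
    rw [List.cons_lt_cons_iff]
    rintro (h | ⟨-, h⟩)
    · exact absurd h (lt_irrefl a)
    · exact ih h

lemma pvLe_of_lt {l m : List Char} (h : l < m) : pvLe l m := by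
  unfold pvLe
  intro h'
  induction m generalizing l with
  | nil => cases h
  | cons b mb ih =>
    cases l with
    | nil => cases h'
    | cons a la =>
      rcases List.cons_lt_cons_iff.1 h with hab | ⟨rfl, hh⟩ <;>
        rcases List.cons_lt_cons_iff.1 h' with hba | ⟨he, hh'⟩
      · exact absurd hba (asymm hab)
      · exact absurd he hab.ne'
      · exact absurd hba (lt_irrefl _)
      · exact ih hh hh'

lemma pvLe_getLast {l : List Char} (h : l.Pairwise (· ≤ ·)) {x : Char} (hx : x ∈ l)
    (hne : l ≠ []) : x ≤ l.getLast hne := by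
  induction l with
  | nil => simp at hx
  | cons a t ih =>
    rcases List.mem_cons.1 hx with rfl | hxt
    · cases t with
      | nil => simp [List.getLast]
      | cons b u =>
        rw [List.getLast_cons (by simp)]
        exact (List.pairwise_cons.1 h).1 _ (List.getLast_mem _)
    · have htne : t ≠ [] := List.ne_nil_of_mem hxt
      rw [List.getLast_cons htne]
      exact ih (List.pairwise_cons.1 h).2 hxt htne

lemma pvLt_append {r₁ r₂ : List Char} (h : r₁ < r₂) (hl : r₁.length = r₂.length)
    (x y : List Char) : r₁ ++ x < r₂ ++ y := by
  induction r₁ generalizing r₂ with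
  | nil => cases r₂ with
    | nil => simp at h
    | cons b t => simp at hl
  | cons a t ih =>
    cases r₂ with
    | nil => simp at hl
    | cons b u =>
      rcases List.cons_lt_cons_iff.1 h with hab | ⟨rfl, htu⟩
      · exact List.cons_lt_cons_iff.2 (Or.inl hab)
      · exact List.cons_lt_cons_iff.2 (Or.inr ⟨rfl, ih htu (by simpa using hl)⟩)

lemma pvAppend_lt_append_left {r x y : List Char} (h : x < y) : r ++ x < r ++ y := by
  induction r with
  | nil => simpa using h
  | cons a t ih => exact List.cons_lt_cons_iff.2 (Or.inr ⟨rfl, ih⟩)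

lemma pvTake_le_of_take_succ_le {m t : List Char} {d : Char} {k : Nat}
    (ht : t.length = k) (h : pvLe (m.take (k + 1)) (t ++ [d])) : pvLe (m.take k) t := by
  induction t generalizing m k with
  | nil =>
    have hk : k = 0 := by simpa using ht.symm
    subst hk; simpa using pvLe_nil []
  | cons a t' ih =>
    cases k with
    | zero => simp at ht
    | succ k' =>
      cases m with
      | nil => exact pvLe_nil _
      | cons b m' =>
        simp only [List.take_succ_cons, List.cons_append] at h ⊢
        rcases pvLe_cons_iff.1 h with hba | ⟨rfl, h'⟩
        · exact pvLe_cons_iff.2 (Or.inl hba)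
        · exact pvLe_cons_iff.2 (Or.inr ⟨rfl, ih (by simpa using ht) h'⟩)

lemma pvLe_take_of_append_le_take_succ {M t : List Char} {d : Char} {k : Nat}
    (ht : t.length = k) (h : pvLe (t ++ [d]) (M.take (k + 1))) : pvLe t (M.take k) := by
  induction t generalizing M k with
  | nil => exact pvLe_nil _
  | cons a t' ih =>
    cases k with
    | zero => simp at ht
    | succ k' =>
      cases M with
      | nil => simp only [List.take_nil, List.cons_append] at h; exact absurd h pvLe_nil_iff
      | cons b M' =>
        simp only [List.take_succ_cons, List.cons_append] at h ⊢
        rcases pvLe_cons_iff.1 h with hab | ⟨rfl, h'⟩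
        · exact pvLe_cons_iff.2 (Or.inl hab)
        · exact pvLe_cons_iff.2 (Or.inr ⟨rfl, ih (by simpa using ht) h'⟩)

lemma pvPairwise_flatMap {α β : Type} {R : α → α → Prop} {S : β → β → Prop}
    {l : List α} {f : α → List β} (hl : l.Pairwise R)
    (hgrp : ∀ a ∈ l, (f a).Pairwise S)
    (hcross : ∀ a b, a ∈ l → b ∈ l → R a b → ∀ x ∈ f a, ∀ y ∈ f b, S x y) :
    (l.flatMap f).Pairwise S := by
  induction l with
  | nil => simp
  | cons a l ih =>
    rw [List.flatMap_cons, List.pairwise_append]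
    refine ⟨hgrp a (by simp), ih (List.pairwise_cons.1 hl).2
      (fun b hb => hgrp b (by simp [hb]))
      (fun b c hb hc hbc => hcross b c (by simp [hb]) (by simp [hc]) hbc), ?_⟩
    intro x hx y hy
    obtain ⟨b, hb, hyb⟩ := List.mem_flatMap.1 hy
    exact hcross a b (by simp) (by simp [hb]) ((List.pairwise_cons.1 hl).1 b hb) x hx y hyb

def pvDigitChars : List Char := ['0', '1', '2', '3', '4', '5', '6', '7', '8', '9']

-- the property characterising A's worklist once it holds strings of length k
def pvGood (m M : List Char) (k : Nat) (s : List Char) : Prop :=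
  s.length = k ∧ (∀ c ∈ s, c ∈ pvDigitChars) ∧ s.Pairwise (· ≤ ·) ∧
    pvLe (m.take k) s ∧ pvLe s (M.take k)

lemma pvDigits_eq : pvDigits = pvDigitChars.map (fun c => [c]) := by decide

lemma pvCwr_mem {pool : List Char} (hp : pool.Pairwise (· < ·)) (n : Nat) (s : List Char) :
    s ∈ pvCwr n pool ↔ s.length = n ∧ s.Pairwise (· ≤ ·) ∧ ∀ c ∈ s, c ∈ pool := by
  induction n, pool using pvCwr.induct generalizing s with
  | case1 pool =>
    constructor
    · intro h
      have : s = [] := by simpa [pvCwr] using h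
      subst this; simp
    · intro ⟨h1, _, _⟩
      have : s = [] := List.eq_nil_of_length_eq_zero h1
      subst this; simp [pvCwr]
  | case2 n =>
    constructor
    · intro h; simp [pvCwr] at h
    · rintro ⟨h1, _, h3⟩
      cases s with
      | nil => simp at h1
      | cons a t => exact absurd (h3 a (by simp)) (by simp)
  | case3 n c rest ih1 ih2 =>
    have hrest : rest.Pairwise (· < ·) := (List.pairwise_cons.1 hp).2
    have hcr : ∀ x ∈ rest, c < x := (List.pairwise_cons.1 hp).1
    rw [pvCwr]
    simp only [List.mem_append, List.mem_map]
    constructor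
    · rintro (⟨t, ht, rfl⟩ | h)
      · obtain ⟨h1, h2, h3⟩ := (ih1 hp t).1 ht
        refine ⟨by simp [h1], ?_, ?_⟩
        · refine List.pairwise_cons.2 ⟨?_, h2⟩
          intro x hx
          rcases List.mem_cons.1 (h3 x hx) with rfl | h
          · exact le_refl _
          · exact le_of_lt (hcr x h)
        · intro x hx
          rcases List.mem_cons.1 hx with rfl | hx
          · simp
          · exact h3 x hx
      · obtain ⟨h1, h2, h3⟩ := (ih2 hrest s).1 h
        exact ⟨h1, h2, fun x hx => List.mem_cons.2 (Or.inr (h3 x hx))⟩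
    · rintro ⟨h1, h2, h3⟩
      cases s with
      | nil => simp at h1
      | cons a t =>
        rcases List.mem_cons.1 (h3 a (by simp)) with rfl | har
        · left
          refine ⟨t, (ih1 hp t).2 ⟨by simpa using h1, (List.pairwise_cons.1 h2).2, ?_⟩, rfl⟩
          intro x hx; exact h3 x (by simp [hx])
        · right
          refine (ih2 hrest _).2 ⟨h1, h2, ?_⟩
          intro x hx
          rcases List.mem_cons.1 hx with rfl | hxt
          · exact har
          · rcases List.mem_cons.1 (h3 x (by simp [hxt])) with rfl | hxr
            · exact absurd ((List.pairwise_cons.1 h2).1 x hxt) (by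
                have := hcr a har
                exact fun hle => absurd (lt_of_lt_of_le this hle) (lt_irrefl _))
            · exact hxr

lemma pvCwr_pairwise {pool : List Char} (hp : pool.Pairwise (· < ·)) (n : Nat) :
    (pvCwr n pool).Pairwise (· < ·) := by
  induction n, pool using pvCwr.induct with
  | case1 pool => simp [pvCwr]
  | case2 n => simp [pvCwr]
  | case3 n c rest ih1 ih2 =>
    have hrest : rest.Pairwise (· < ·) := (List.pairwise_cons.1 hp).2
    have hcr : ∀ x ∈ rest, c < x := (List.pairwise_cons.1 hp).1
    rw [pvCwr, List.pairwise_append]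
    refine ⟨List.Pairwise.map _ ?_ (ih1 hp), ih2 hrest, ?_⟩
    · intro a b hab
      exact List.cons_lt_cons_iff.2 (Or.inr ⟨rfl, hab⟩)
    · intro x hx y hy
      obtain ⟨t, _, rfl⟩ := List.mem_map.1 hx
      obtain ⟨h1, _, h3⟩ := (pvCwr_mem hrest (n + 1) y).1 hy
      cases y with
      | nil => simp at h1
      | cons b u => exact List.cons_lt_cons_iff.2 (Or.inl (hcr b (h3 b (by simp))))

lemma pvLe_singleton {x y : Char} : pvLe [x] [y] ↔ x ≤ y := by
  rw [pvLe_cons_iff]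
  constructor
  · rintro (h | ⟨rfl, -⟩)
    · exact le_of_lt h
    · exact le_refl _
  · intro h
    rcases lt_or_eq_of_le h with h | rfl
    · exact Or.inl h
    · exact Or.inr ⟨rfl, pvLe_refl _⟩

lemma pvDigits_pairwise : pvDigits.Pairwise (· < ·) := by decide

-- level 1 of A's search
lemma pvLvl1_char {m M : List Char} (hm : m ≠ []) (hM : M ≠ []) :
    (∀ s, s ∈ pvLvl1 m M ↔ pvGood m M 1 s) ∧ (pvLvl1 m M).Pairwise (· < ·) := by
  obtain ⟨a, m', rfl⟩ := List.exists_cons_of_ne_nil hm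
  obtain ⟨b, M', rfl⟩ := List.exists_cons_of_ne_nil hM
  refine ⟨?_, List.Pairwise.filter _ pvDigits_pairwise⟩
  intro s
  rw [pvLvl1, List.mem_filter]
  simp only [Bool.and_eq_true, pvLeB_iff, PySem.List.pyGetD_zero_cons]
  constructor
  · rintro ⟨hmem, h1, h2⟩
    rw [pvDigits_eq, List.mem_map] at hmem
    obtain ⟨c, hc, rfl⟩ := hmem
    exact ⟨rfl, by simpa using hc, by simp, by simpa using h1, by simpa using h2⟩
  · rintro ⟨h1, h2, h3, h4, h5⟩
    obtain ⟨c, rfl⟩ := List.length_eq_one_iff.1 h1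
    refine ⟨?_, by simpa using h4, by simpa using h5⟩
    rw [pvDigits_eq, List.mem_map]
    exact ⟨c, by simpa using h2 c (by simp), rfl⟩

-- one step of A's search
lemma pvStep_char {m M : List Char} {k : Nat} (hk : 1 ≤ k) {vs : List (List Char)}
    (hmem : ∀ s, s ∈ vs ↔ pvGood m M k s) (hpw : vs.Pairwise (· < ·)) :
    (∀ s, s ∈ pvStep m M vs (k : Int) ↔ pvGood m M (k + 1) s) ∧
      (pvStep m M vs (k : Int)).Pairwise (· < ·) := by
  have hsl : ∀ (l : List Char), PySem.List.slice l none (some ((k : Int) + 1)) = l.take (k + 1) := by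
    intro l
    rw [show ((k : Int) + 1) = (((k + 1 : Nat)) : Int) by push_cast; ring]
    exact PySem.List.slice_to_natCast l (k + 1)
  constructor
  · intro s
    rw [pvStep, List.mem_flatMap]
    constructor
    · rintro ⟨root, hroot, hs⟩
      obtain ⟨x, hx, rfl⟩ := List.mem_map.1 hs
      rw [List.mem_filter] at hx
      obtain ⟨hxd, hconds⟩ := hx
      rw [pvDigits_eq, List.mem_map] at hxd
      obtain ⟨c, hc, rfl⟩ := hxd
      obtain ⟨hlen, hdig, hnd, hlo, hhi⟩ := (hmem root).1 hroot
      have hrne : root ≠ [] := by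
        intro h; rw [h] at hlen; simp at hlen; omega
      simp only [Bool.and_eq_true, pvLeB_iff, hsl,
        PySem.List.pyGetD_neg_one _ _ hrne] at hconds
      obtain ⟨⟨hc1, hc2⟩, hc3⟩ := hconds
      have hlast : root.getLast hrne ≤ c := pvLe_singleton.1 hc3
      refine ⟨by simp [hlen], ?_, ?_, hc1, hc2⟩
      · intro x hx
        rcases List.mem_append.1 hx with hx | hx
        · exact hdig x hx
        · simp only [List.mem_singleton] at hx
          subst hx; simpa using hc
      · rw [List.pairwise_append]
        refine ⟨hnd, by simp, ?_⟩
        intro x hx y hy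
        simp only [List.mem_singleton] at hy
        subst hy
        exact le_trans (pvLe_getLast hnd hx hrne) hlast
    · rintro ⟨hlen, hdig, hnd, hlo, hhi⟩
      have hsne : s ≠ [] := by
        intro h; rw [h] at hlen; simp at hlen
      have hsplit : s.dropLast ++ [s.getLast hsne] = s := List.dropLast_concat_getLast hsne
      have hrlen : s.dropLast.length = k := by
        rw [List.length_dropLast, hlen]; omega
      have hrne : s.dropLast ≠ [] := by
        intro h
        rw [h] at hrlen; simp at hrlen; omega
      have hrd : ∀ c ∈ s.dropLast, c ∈ pvDigitChars :=
        fun c hc => hdig c (List.mem_of_mem_dropLast hc)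
      have hrnd : s.dropLast.Pairwise (· ≤ ·) := hnd.sublist (List.dropLast_sublist s)
      have hlo' : pvLe (m.take k) s.dropLast := by
        apply pvTake_le_of_take_succ_le hrlen
        rw [hsplit]; exact hlo
      have hhi' : pvLe s.dropLast (M.take k) := by
        apply pvLe_take_of_append_le_take_succ hrlen
        rw [hsplit]; exact hhi
      refine ⟨s.dropLast, (hmem _).2 ⟨hrlen, hrd, hrnd, hlo', hhi'⟩, ?_⟩
      rw [List.mem_map]
      refine ⟨[s.getLast hsne], ?_, hsplit⟩
      rw [List.mem_filter]
      constructor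
      · rw [pvDigits_eq, List.mem_map]
        exact ⟨s.getLast hsne, hdig _ (List.getLast_mem hsne), rfl⟩
      · simp only [Bool.and_eq_true, pvLeB_iff, hsl,
          PySem.List.pyGetD_neg_one _ _ hrne]
        have hcross : s.dropLast.getLast hrne ≤ s.getLast hsne := by
          have hpw' := hnd
          conv at hpw' => rw [← hsplit]
          rw [List.pairwise_append] at hpw'
          exact hpw'.2.2 _ (List.getLast_mem hrne) _ (by simp)
        exact ⟨⟨by rw [hsplit]; exact hlo, by rw [hsplit]; exact hhi⟩,
          pvLe_singleton.2 hcross⟩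
  · apply pvPairwise_flatMap hpw
    · intro root hroot
      apply List.Pairwise.map _ (fun a b hab => pvAppend_lt_append_left hab)
      exact List.Pairwise.filter _ pvDigits_pairwise
    · intro r1 r2 h1 h2 hr x hx y hy
      obtain ⟨x', -, rfl⟩ := List.mem_map.1 hx
      obtain ⟨y', -, rfl⟩ := List.mem_map.1 hy
      have hl1 := ((hmem r1).1 h1).1
      have hl2 := ((hmem r2).1 h2).1
      exact pvLt_append hr (by rw [hl1, hl2]) _ _

-- the whole fold
lemma pvFold_char {m M : List Char} (hm : m ≠ []) (hM : M ≠ []) (k : Nat) (hk : 1 ≤ k) :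
    (∀ s, s ∈ (PySem.List.pyRange 1 (k : Int) 1).foldl (pvStep m M) (pvLvl1 m M) ↔
        pvGood m M k s) ∧
      ((PySem.List.pyRange 1 (k : Int) 1).foldl (pvStep m M) (pvLvl1 m M)).Pairwise (· < ·) := by
  induction k, hk using Nat.le_induction with
  | base =>
    rw [PySem.List.pyRange_one_eq_nil (by norm_num)]
    exact pvLvl1_char hm hM
  | succ k hk ih =>
    rw [show (((k + 1 : Nat)) : Int) = (k : Int) + 1 by push_cast; ring,
      PySem.List.pyRange_one_succ_right (by exact_mod_cast hk), List.foldl_append]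
    simp only [List.foldl_cons, List.foldl_nil]
    exact pvStep_char hk ih.1 ih.2

-- the two adjacency tests agree
lemma pvHasDouble_eq_hasAdj (s : List Char) : pvHasDouble s = pvHasAdj s := by
  rw [pvHasDouble, pvHasAdj, PySem.List.slice_from_one, Bool.eq_iff_iff,
    List.any_eq_true, List.any_eq_true]
  simp only [PySem.Chars.len_eq]
  constructor
  · rintro ⟨i, hi, hf⟩
    rw [PySem.List.mem_pyRange_one] at hi
    obtain ⟨h0, h1⟩ := hi
    have hj : i.toNat < s.length - 1 := by omega
    have hjs : i.toNat < s.length := by omega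
    have hzl : i.toNat < (s.zip s.tail).length := by
      rw [List.length_zip, List.length_tail]; omega
    refine ⟨(s.zip s.tail)[i.toNat], List.getElem_mem _, ?_⟩
    rw [List.getElem_zip, List.getElem_tail]
    rw [PySem.List.pyGetD_of_nonneg s ' ' h0,
      PySem.List.pyGetD_of_nonneg s ' ' (by omega),
      show (i + 1).toNat = i.toNat + 1 by omega,
      List.getD_eq_getElem s ' ' hjs, List.getD_eq_getElem s ' ' (by omega)] at hf
    simpa using hf
  · rintro ⟨p, hp, hf⟩
    obtain ⟨j, hjl, rfl⟩ := List.mem_iff_getElem.1 hp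
    have hjz : j < s.length - 1 := by
      rw [List.length_zip, List.length_tail] at hjl; omega
    refine ⟨(j : Int), ?_, ?_⟩
    · rw [PySem.List.mem_pyRange_one]; constructor <;> [positivity; omega]
    · rw [List.getElem_zip, List.getElem_tail] at hf
      rw [PySem.List.pyGetD_of_nonneg s ' ' (by positivity),
        PySem.List.pyGetD_of_nonneg s ' ' (by positivity),
        show ((j : Int)).toNat = j by omega,
        show ((j : Int) + 1).toNat = j + 1 by omega,
        List.getD_eq_getElem s ' ' (by omega), List.getD_eq_getElem s ' ' (by omega)]
      simpa using hf

-- facts about the zero-filled decimal images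
lemma pvFmt06_length (n : Int) : (pvFmt06 n).length = max (PySem.Int.toChars n).length 6 := by
  simp [pvFmt06, PySem.Chars.length_zfill]

lemma pvFmt06_ne_nil (n : Int) : pvFmt06 n ≠ [] := by
  intro h
  have := pvFmt06_length n
  rw [h] at this
  simp at this
  omega

lemma pvFmt06_neg {n : Int} (h : n < 0) : ∃ r, pvFmt06 n = '-' :: r := by
  unfold pvFmt06 PySem.Int.toChars
  rw [if_pos h]
  unfold PySem.Chars.zfill
  split_ifs with h1
  · exact ⟨_, rfl⟩
  · simp only []
    rw [if_pos (by simp)]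
    exact ⟨_, rfl⟩

lemma pvFmt06_length_mono {a b : Int} (ha : 0 ≤ a) (hab : a ≤ b) :
    (pvFmt06 a).length ≤ (pvFmt06 b).length := by
  rw [pvFmt06_length, pvFmt06_length]
  have hmono : (Nat.toDigits 10 a.toNat).length ≤ (Nat.toDigits 10 b.toNat).length := by
    have e := (Nat.toDigits 10 b.toNat).length
    have hpos : 0 < (Nat.toDigits 10 b.toNat).length := Nat.length_toDigits_pos
    have hb10 : b.toNat < 10 ^ (Nat.toDigits 10 b.toNat).length :=
      (Nat.length_toDigits_le_iff (by norm_num) hpos).1 (le_refl _)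
    have hab' : a.toNat ≤ b.toNat := Int.toNat_le_toNat hab
    exact (Nat.length_toDigits_le_iff (by norm_num) hpos).2 (by omega)
  unfold PySem.Int.toChars
  rw [if_neg (by omega), if_neg (by omega)]
  omega

lemma pvLt_ne {a b : List Char} (h : a < b) : a ≠ b :=
  fun he => pvLe_refl b (he ▸ h)

-- two strictly sorted lists with the same members are equal
lemma pvSorted_eq {l₁ l₂ : List (List Char)} (h₁ : l₁.Pairwise (· < ·))
    (h₂ : l₂.Pairwise (· < ·)) (h : ∀ s, s ∈ l₁ ↔ s ∈ l₂) : l₁ = l₂ := by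
  have nd₁ : l₁.Nodup := h₁.imp pvLt_ne
  have nd₂ : l₂.Nodup := h₂.imp pvLt_ne
  exact List.Perm.eq_of_pairwise (fun a b _ _ h1 h2 => absurd h2 (pvLe_of_lt h1)) h₁ h₂
    ((List.perm_ext_iff_of_nodup nd₁ nd₂).2 h)

lemma pvMin_le_max {limits : List Int} (h : limits ≠ []) :
    PySem.List.minD limits (fun x => x) 0 ≤ PySem.List.maxD limits (fun x => x) 0 := by
  cases hmin : PySem.List.min? limits (fun x => x) with
  | none => exact absurd ((PySem.List.min?_eq_none_iff _ _).1 hmin) h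
  | some a =>
    cases hmax : PySem.List.max? limits (fun x => x) with
    | none => exact absurd ((PySem.List.max?_eq_none_iff _ _).1 hmax) h
    | some b =>
      have ha : a ∈ limits := PySem.List.min?_mem hmin
      have hab : a ≤ b := PySem.List.max?_isMax hmax a ha
      simp [PySem.List.minD, PySem.List.maxD, hmin, hmax, hab]

lemma pvNeg_lt_digit : ∀ c ∈ pvDigitChars, '-' < c := by
  intro c hc; fin_cases hc <;> decide

-- the final bridge: on digit strings of full width, A's prefix bound is B's full bound
lemma pvTake_bound_iff {mn : Int} {L : Nat} (hL : 1 ≤ L)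
    (hlen : mn < 0 ∨ (pvFmt06 mn).length ≤ L) {s : List Char}
    (hslen : s.length = L) (hdig : ∀ c ∈ s, c ∈ pvDigitChars) :
    (pvLe ((pvFmt06 mn).take L) s ↔ pvLe (pvFmt06 mn) s) := by
  rcases hlen with hneg | hle
  · obtain ⟨r, hr⟩ := pvFmt06_neg hneg
    cases s with
    | nil => simp at hslen; omega
    | cons d t =>
      have hd : '-' < d := pvNeg_lt_digit d (hdig d (by simp))
      cases L with
      | zero => omega
      | succ L' =>
        rw [hr]
        simp only [List.take_succ_cons]
        constructor <;> intro <;> exact pvLe_cons_iff.2 (Or.inl hd)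
  · rw [List.take_of_length_le hle]

-- ===== VERDICT (by name: the statement is the Claim_ definition above) =====
theorem viable_passwords_spec : Claim_equal_viable_passwords := by
  unfold Claim_equal_viable_passwords
  intro limits _ hpre
  unfold Spec_viable_passwords
  simp only [viable_passwords, viable_passwords_alt]
  set mn := PySem.List.minD limits (fun x => x) 0 with hmn
  set mx := PySem.List.maxD limits (fun x => x) 0 with hmx
  set m := pvFmt06 mn with hm
  set M := pvFmt06 mx with hM
  have hm_ne : m ≠ [] := pvFmt06_ne_nil mn
  have hM_ne : M ≠ [] := pvFmt06_ne_nil mx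
  have hM6 : 6 ≤ M.length := by rw [hM, pvFmt06_length]; omega
  have hL1 : 1 ≤ M.length := by omega
  have hpool : ("0123456789".toList).Pairwise (· < ·) := by decide
  have hpool_eq : "0123456789".toList = pvDigitChars := by decide
  -- A's loop: characterise the final worklist
  have hchars : PySem.Chars.len M = ((M.length : Nat) : Int) := by
    simp [PySem.Chars.len_eq]
  rw [hchars]
  obtain ⟨hAmem, hApw⟩ := pvFold_char hm_ne hM_ne M.length hL1
  -- B's loop: a conditional-append fold is filter-then-map
  rw [PySem.List.foldl_append_if
    (fun combo => pvLeB m combo && pvLeB combo M && pvHasAdj combo)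
    (fun combo => (PySem.Int.ofChars? combo).getD 0)]
  rw [List.nil_append]
  -- reduce to equality of the two string lists
  refine congrArg (List.map _) ?_
  apply pvSorted_eq (hApw.filter _) ((pvCwr_pairwise hpool M.length).filter _)
  intro s
  rw [List.mem_filter, List.mem_filter, hAmem s,
    pvCwr_mem hpool M.length s, hpool_eq]
  simp only [Bool.and_eq_true, pvLeB_iff, pvHasDouble_eq_hasAdj]
  have hlen : mn < 0 ∨ m.length ≤ M.length := by
    by_cases hneg : mn < 0
    · exact Or.inl hneg
    · exact Or.inr (pvFmt06_length_mono (by omega) (pvMin_le_max hpre))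
  constructor
  · rintro ⟨⟨h1, h2, h3, h4, h5⟩, h6⟩
    rw [List.take_length] at h5
    exact ⟨⟨h1, h3, h2⟩, ⟨⟨(pvTake_bound_iff hL1 hlen h1 h2).1 h4, h5⟩, h6⟩⟩
  · rintro ⟨⟨h1, h3, h2⟩, ⟨h4, h5⟩, h6⟩
    refine ⟨⟨h1, h2, h3, (pvTake_bound_iff hL1 hlen h1 h2).2 h4, ?_⟩, h6⟩
    rw [List.take_length]
    exact h5
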